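-- pv_equiv track=rewrite | github.com/CASY82/CHH_StudyRoom | Algo/Greedy/Baek_32713.py | max_run_after_deletions
-- ===== SOURCE A (Python) =====
-- from collections import defaultdict
--
-- def max_run_after_deletions(a, k):
--     idx = defaultdict(list)
--     for i, x in enumerate(a):
--         idx[x].append(i)
--
--     ans = 1
--     for v, pos in idx.items():
--         i = 0
--
--         for j in range(len(pos)):
--             while i <= j and (pos[j] - pos[i] - (j - i)) > k:
--                 i += 1
--
--             ans = max(ans, j - i + 1)
--
--     return ans
-- ===== SOURCE B (Python) =====
-- from bisect import bisect_left
--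
-- def max_run_after_deletions(a, k):
--     idx = {}
--     for i, x in enumerate(a):
--         idx.setdefault(x, []).append(i)
--
--     ans = 1
--     for pos in idx.values():
--         b = [p - i for i, p in enumerate(pos)]
--         for j in range(len(b)):
--             r = bisect_left(b, b[j] - k)
--             ans = max(ans, j - r + 1)
--     return ans
-- ===== Notes on version B (the rewrite author's own statement) =====
-- stated objective: alternative
-- what changed: The stateful two-pointer sliding window inside each value group is replaced by an independent binary search (bisect_left) per right endpoint over the sorted key array b[i]=pos[i]-i; contributions whose search point lies past j are <= 0 and vanish in the running max.
import Mathlib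
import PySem

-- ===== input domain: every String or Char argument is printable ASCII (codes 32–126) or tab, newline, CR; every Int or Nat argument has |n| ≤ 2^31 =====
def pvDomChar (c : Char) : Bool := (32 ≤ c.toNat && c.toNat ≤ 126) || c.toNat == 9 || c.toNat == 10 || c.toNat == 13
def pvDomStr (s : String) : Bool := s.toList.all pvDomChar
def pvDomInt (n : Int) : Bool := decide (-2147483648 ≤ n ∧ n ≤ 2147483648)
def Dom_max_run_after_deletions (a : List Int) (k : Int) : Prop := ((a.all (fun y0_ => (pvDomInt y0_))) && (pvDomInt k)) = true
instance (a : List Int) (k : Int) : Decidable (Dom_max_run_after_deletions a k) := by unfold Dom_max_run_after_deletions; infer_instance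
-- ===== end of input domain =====

-- B replaces A's stateful two-pointer window inside each value group by an independent
-- bisect_left per right endpoint on the key array b[i] = pos[i] - i (alternative algorithm).

-- ===== PORT A =====
-- the inner 'while i <= j and (pos[j] - pos[i] - (j - i)) > k: i += 1'
def aAdvance (pos : List Int) (k : Int) (j : Nat) (i : Nat) : Nat :=
  if h : i ≤ j ∧ PySem.List.pyGetD pos (j : Int) 0 - PySem.List.pyGetD pos (i : Int) 0 - ((j : Int) - (i : Int)) > k then
    aAdvance pos k j (i + 1)
  else i
termination_by j + 1 - i
decreasing_by omega

def max_run_after_deletions (a : List Int) (k : Int) : Int :=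
  -- idx = defaultdict(list); for i, x in enumerate(a): idx[x].append(i)
  let idx := (PySem.List.enumerate a).foldl
    (fun d p => d.modify p.2 [] (fun l => l ++ [p.1])) PySem.Dict.empty
  -- ans = 1; for v, pos in idx.items(): i = 0; for j in range(len(pos)): while …; ans = max(…)
  idx.values.foldl (fun ans pos =>
    ((List.range pos.length).foldl (fun st j =>
        let i := aAdvance pos k j st.1
        (i, max st.2 ((j : Int) - (i : Int) + 1))) ((0 : Nat), ans)).2) 1

-- ===== PORT B =====
-- b = [p - i for i, p in enumerate(pos)]
def bKeys (pos : List Int) : List Int :=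
  (PySem.List.enumerate pos).map (fun p => p.2 - p.1)

def max_run_after_deletions_alt (a : List Int) (k : Int) : Int :=
  -- idx = {}; for i, x in enumerate(a): idx.setdefault(x, []).append(i)
  let idx := (PySem.List.enumerate a).foldl
    (fun d p => d.modify p.2 [] (fun l => l ++ [p.1])) PySem.Dict.empty
  -- ans = 1; for pos in idx.values(): b = …; for j in range(len(b)): r = bisect_left(b, b[j]-k); ans = max(…)
  idx.values.foldl (fun ans pos =>
    let b := bKeys pos
    (List.range b.length).foldl (fun ans (j : Nat) =>
      let r := PySem.List.bisectLeft b (PySem.List.pyGetD b (j : Int) 0 - k)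
      max ans ((j : Int) - (r : Int) + 1)) ans) 1

-- ===== PRECONDITION & SPEC =====
def Spec_max_run_after_deletions (a : List Int) (k : Int) (out : Int) : Prop := out = max_run_after_deletions_alt a k
instance (a : List Int) (k : Int) (out : Int) : Decidable (Spec_max_run_after_deletions a k out) := by unfold Spec_max_run_after_deletions; infer_instance

-- ===== CLAIM (what is proved, stated in full; the proofs are below) =====
def Claim_equal_max_run_after_deletions : Prop := ∀ (a : List Int) (k : Int), Dom_max_run_after_deletions a k → Spec_max_run_after_deletions a k (max_run_after_deletions a k)

-- ===== LEMMAS AND PROOFS =====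

theorem bKeys_length (pos : List Int) : (bKeys pos).length = pos.length := by
  simp [bKeys]

-- the key value b[m] = pos[m] - m, as a total function
def Bv (pos : List Int) (m : Nat) : Int := (bKeys pos).getD m 0

theorem Bv_eq (pos : List Int) (m : Nat) (h : m < pos.length) :
    Bv pos m = pos[m] - (m : Int) := by
  have hm : m < (bKeys pos).length := by rw [bKeys_length]; exact h
  rw [Bv, List.getD_eq_getElem _ _ hm]
  simp [bKeys, PySem.List.getElem_enumerate]

theorem Bv_eq_getElem (pos : List Int) (m : Nat) (h : m < (bKeys pos).length) :
    Bv pos m = (bKeys pos)[m] := by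
  rw [Bv, List.getD_eq_getElem _ _ h]

-- strictly increasing integer positions give a nondecreasing key array
theorem Bv_mono (pos : List Int) (hp : pos.Pairwise (· < ·)) (p q : Nat)
    (hpq : p ≤ q) (hq : q < pos.length) : Bv pos p ≤ Bv pos q := by
  induction q, hpq using Nat.le_induction with
  | base => exact le_refl _
  | succ q hpq ih =>
    have hq' : q < pos.length := by omega
    have hlt : pos[q] < pos[q + 1] := by
      exact (List.pairwise_iff_getElem.mp hp) q (q + 1) hq' hq (by omega)
    have h1 := ih hq'
    rw [Bv_eq pos q hq'] at h1
    rw [Bv_eq pos (q + 1) hq]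
    push_cast
    omega

theorem bKeys_pairwise_le (pos : List Int) (hp : pos.Pairwise (· < ·)) :
    (bKeys pos).Pairwise (· ≤ ·) := by
  rw [List.pairwise_iff_getElem]
  intro p q hpl hql hlt
  rw [← Bv_eq_getElem pos p hpl, ← Bv_eq_getElem pos q hql]
  exact Bv_mono pos hp p q (by omega) (by rw [← bKeys_length pos]; exact hql)

-- what A's while loop computes
theorem aAdvance_spec (pos : List Int) (k : Int) (j : Nat) : ∀ (i : Nat), i ≤ j + 1 →
    i ≤ aAdvance pos k j i ∧ aAdvance pos k j i ≤ j + 1 ∧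
    (∀ m, i ≤ m → m < aAdvance pos k j i →
      m ≤ j ∧ PySem.List.pyGetD pos (j : Int) 0 - PySem.List.pyGetD pos (m : Int) 0 - ((j : Int) - (m : Int)) > k) ∧
    (aAdvance pos k j i ≤ j →
      ¬ (PySem.List.pyGetD pos (j : Int) 0 - PySem.List.pyGetD pos ((aAdvance pos k j i : Nat) : Int) 0 - ((j : Int) - (aAdvance pos k j i : Int)) > k)) := by
  suffices H : ∀ (f i : Nat), j + 1 - i ≤ f → i ≤ j + 1 →
      i ≤ aAdvance pos k j i ∧ aAdvance pos k j i ≤ j + 1 ∧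
      (∀ m, i ≤ m → m < aAdvance pos k j i →
        m ≤ j ∧ PySem.List.pyGetD pos (j : Int) 0 - PySem.List.pyGetD pos (m : Int) 0 - ((j : Int) - (m : Int)) > k) ∧
      (aAdvance pos k j i ≤ j →
        ¬ (PySem.List.pyGetD pos (j : Int) 0 - PySem.List.pyGetD pos ((aAdvance pos k j i : Nat) : Int) 0 - ((j : Int) - (aAdvance pos k j i : Int)) > k)) by
    intro i hi; exact H (j + 1) i (by omega) hi
  intro f
  induction f with
  | zero =>
    intro i hf hi
    have hij : i = j + 1 := by omega
    rw [aAdvance, dif_neg (by omega)]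
    exact ⟨le_refl _, hi, by omega, by omega⟩
  | succ f ih =>
    intro i hf hi
    rw [aAdvance]
    split_ifs with h
    · obtain ⟨h1, h2, h3, h4⟩ := ih (i + 1) (by omega) (by omega)
      refine ⟨by omega, h2, ?_, h4⟩
      intro m hm1 hm2
      rcases Nat.eq_or_lt_of_le hm1 with rfl | hlt
      · exact ⟨h.1, h.2⟩
      · exact h3 m (by omega) hm2
    · exact ⟨le_refl _, hi, by omega, fun hij hc => h ⟨hij, hc⟩⟩

-- one step j: A's advanced pointer and B's bisect give the same max update,
-- and the invariant (everything left of the pointer is below b[j] - k) is maintained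
theorem step_eq (pos : List Int) (k : Int) (hp : pos.Pairwise (· < ·)) (j : Nat)
    (hj : j < pos.length) (i : Nat) (hij : i ≤ j)
    (hinv : ∀ m, m < i → Bv pos m < Bv pos j - k) :
    (∀ ans : Int, 1 ≤ ans →
      max ans ((j : Int) - ((aAdvance pos k j i : Nat) : Int) + 1) =
      max ans ((j : Int) - ((PySem.List.bisectLeft (bKeys pos) (PySem.List.pyGetD (bKeys pos) (j : Int) 0 - k) : Nat) : Int) + 1)) ∧
    aAdvance pos k j i ≤ j + 1 ∧
    (∀ m, m < aAdvance pos k j i → Bv pos m < Bv pos j - k) := by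
  have hlen : (bKeys pos).length = pos.length := bKeys_length pos
  have hxj : PySem.List.pyGetD (bKeys pos) (j : Int) 0 = Bv pos j := by
    rw [PySem.List.pyGetD_natCast]; rfl
  rw [hxj]
  set x := Bv pos j - k with hx
  obtain ⟨hr1, hr2, hr3⟩ := PySem.List.bisectLeft_spec (bKeys pos) x (bKeys_pairwise_le pos hp)
  set r := PySem.List.bisectLeft (bKeys pos) x with hrdef
  obtain ⟨ha1, ha2, ha3, ha4⟩ := aAdvance_spec pos k j i (by omega)
  set i' := aAdvance pos k j i with hidef
  have hgap : ∀ m : Nat, m ≤ j →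
      (PySem.List.pyGetD pos (j : Int) 0 - PySem.List.pyGetD pos (m : Int) 0 - ((j : Int) - (m : Int)) > k
        ↔ Bv pos m < x) := by
    intro m hm
    have hmn : m < pos.length := by omega
    rw [PySem.List.pyGetD_natCast, PySem.List.pyGetD_natCast,
        List.getD_eq_getElem _ _ hmn, List.getD_eq_getElem _ _ hj,
        Bv_eq pos m hmn, hx, Bv_eq pos j hj]
    omega
  have hlow : ∀ m, m < i' → Bv pos m < x := by
    intro m hm
    by_cases hmi : m < i
    · exact hinv m hmi
    · have := ha3 m (by omega) hm
      exact (hgap m this.1).mp this.2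
  refine ⟨?_, ha2, hlow⟩
  intro ans hans
  by_cases hc : r ≤ j
  · -- the bisect point is ≤ j: the two-pointer lands exactly on it
    have hrn : r < (bKeys pos).length := by omega
    have hxr : x ≤ Bv pos r := by
      rw [Bv_eq_getElem pos r hrn]; exact hr3 r hrn (le_refl r)
    have hi'j : i' ≤ j := by
      by_contra hcon
      have : r < i' := by omega
      exact absurd (hlow r this) (by omega)
    have hxi' : x ≤ Bv pos i' := by
      have := ha4 hi'j
      rw [hgap i' hi'j] at this
      omega
    have h1 : r ≤ i' := by
      by_contra hcon
      have hi'n : i' < (bKeys pos).length := by omega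
      have := hr2 i' hi'n (by omega)
      rw [← Bv_eq_getElem pos i' hi'n] at this
      omega
    have h2 : i' ≤ r := by
      by_contra hcon
      exact absurd (hlow r (by omega)) (by omega)
    have : i' = r := by omega
    rw [this]
  · -- the bisect point is past j: both contributions are ≤ 0 and swallowed by ans ≥ 1
    have hi' : i' = j + 1 := by
      by_contra hcon
      have hi'j : i' ≤ j := by omega
      have hi'n : i' < (bKeys pos).length := by omega
      have hlt := hr2 i' hi'n (by omega)
      rw [← Bv_eq_getElem pos i' hi'n] at hlt
      have := ha4 hi'j
      rw [hgap i' hi'j] at this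
      omega
    rw [hi']
    rw [max_eq_left (by omega), max_eq_left (by push_cast; omega)]

-- the two inner loops agree on every prefix of range(len(pos))
theorem group_prefix (pos : List Int) (k : Int) (hp : pos.Pairwise (· < ·)) :
    ∀ t, t ≤ pos.length → ∀ ans : Int, 1 ≤ ans →
    ((List.range t).foldl (fun st j =>
        let i := aAdvance pos k j st.1
        (i, max st.2 ((j : Int) - (i : Int) + 1))) ((0 : Nat), ans)).2 =
      (List.range t).foldl (fun ans (j : Nat) =>
        let r := PySem.List.bisectLeft (bKeys pos) (PySem.List.pyGetD (bKeys pos) (j : Int) 0 - k)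
        max ans ((j : Int) - (r : Int) + 1)) ans ∧
    ans ≤ ((List.range t).foldl (fun st j =>
        let i := aAdvance pos k j st.1
        (i, max st.2 ((j : Int) - (i : Int) + 1))) ((0 : Nat), ans)).2 ∧
    ((List.range t).foldl (fun st j =>
        let i := aAdvance pos k j st.1
        (i, max st.2 ((j : Int) - (i : Int) + 1))) ((0 : Nat), ans)).1 ≤ t ∧
    (∀ m, m < ((List.range t).foldl (fun st j =>
        let i := aAdvance pos k j st.1
        (i, max st.2 ((j : Int) - (i : Int) + 1))) ((0 : Nat), ans)).1 →
      ∀ jj, t ≤ jj + 1 → jj < pos.length → Bv pos m < Bv pos jj - k) := by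
  intro t
  induction t with
  | zero => intro _ ans hans; simp
  | succ t ih =>
    intro ht ans hans
    have htn : t < pos.length := by omega
    obtain ⟨ih1, ih2, ih3, ih4⟩ := ih (by omega) ans hans
    rw [List.range_succ, List.foldl_append, List.foldl_append]
    set sA := (List.range t).foldl (fun st j =>
        let i := aAdvance pos k j st.1
        (i, max st.2 ((j : Int) - (i : Int) + 1))) ((0 : Nat), ans) with hsA
    set sB := (List.range t).foldl (fun ans (j : Nat) =>
        let r := PySem.List.bisectLeft (bKeys pos) (PySem.List.pyGetD (bKeys pos) (j : Int) 0 - k)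
        max ans ((j : Int) - (r : Int) + 1)) ans with hsB
    have hinv : ∀ m, m < sA.1 → Bv pos m < Bv pos t - k := by
      intro m hm; exact ih4 m hm t (by omega) htn
    obtain ⟨hmax, hle, hnew⟩ := step_eq pos k hp t htn sA.1 ih3 hinv
    simp only [List.foldl_cons, List.foldl_nil]
    refine ⟨?_, ?_, ?_, ?_⟩
    · have h := hmax sA.2 (by omega)
      rw [h, ih1]
    · exact le_trans ih2 (le_max_left _ _)
    · exact hle
    · intro m hm jj hjj hjjn
      have h1 : Bv pos m < Bv pos t - k := hnew m hm
      have h2 : Bv pos t ≤ Bv pos jj := Bv_mono pos hp t jj (by omega) hjjn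
      omega

-- every value list of the grouping dict is a strictly increasing list of positions
theorem values_pairwise (a : List Int) :
    ∀ pos ∈ ((PySem.List.enumerate a).foldl
        (fun d p => d.modify p.2 [] (fun l => l ++ [p.1])) PySem.Dict.empty).values,
      pos.Pairwise (· < ·) := by
  intro pos hpos
  set d := (PySem.List.enumerate a).foldl
      (fun d p => d.modify p.2 [] (fun l => l ++ [p.1])) PySem.Dict.empty with hd
  have hnd : d.keys.Nodup := by
    rw [hd]
    exact PySem.Dict.nodup_keys_foldl_modify_key (PySem.List.enumerate a)
      (fun (p : Int × Int) => p.2) [] (fun _ p => fun l => l ++ [p.1]) PySem.Dict.empty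
      PySem.Dict.nodup_keys_empty
  simp only [PySem.Dict.values] at hpos
  obtain ⟨⟨c, v⟩, hmem, hv⟩ := List.mem_map.mp hpos
  have hget : d.getD c [] = pos := by
    rw [← hv]; exact PySem.Dict.getD_of_mem_items d hmem hnd []
  have hrw : d = ((PySem.List.enumerate a).map (fun p => (p.2, p.1))).foldl
      (fun d q => d.modify q.1 [] (fun l => l ++ [q.2])) PySem.Dict.empty := by
    rw [hd, List.foldl_map]
  rw [hrw, PySem.Dict.getD_foldl_modify_append] at hget
  simp only [PySem.Dict.getD_empty, List.nil_append] at hget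
  rw [← hget]
  have h1 : ((PySem.List.enumerate a).map (fun p => (p.2, p.1))).Pairwise (fun p q => p.2 < q.2) := by
    rw [List.pairwise_map]
    exact PySem.List.pairwise_lt_enumerate a 0
  have h2 := List.Pairwise.sublist (List.filter_sublist (p := fun p => p.1 == c)) h1
  exact List.pairwise_map.mpr h2

-- the outer loops over the dict's value lists agree
theorem fold_groups (k : Int) : ∀ (l : List (List Int)), (∀ pos ∈ l, pos.Pairwise (· < ·)) →
    ∀ ans : Int, 1 ≤ ans →
    l.foldl (fun ans pos =>
      ((List.range pos.length).foldl (fun st j =>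
          let i := aAdvance pos k j st.1
          (i, max st.2 ((j : Int) - (i : Int) + 1))) ((0 : Nat), ans)).2) ans =
    l.foldl (fun ans pos =>
      let b := bKeys pos
      (List.range b.length).foldl (fun ans (j : Nat) =>
        let r := PySem.List.bisectLeft b (PySem.List.pyGetD b (j : Int) 0 - k)
        max ans ((j : Int) - (r : Int) + 1)) ans) ans ∧
    ans ≤ l.foldl (fun ans pos =>
      ((List.range pos.length).foldl (fun st j =>
          let i := aAdvance pos k j st.1
          (i, max st.2 ((j : Int) - (i : Int) + 1))) ((0 : Nat), ans)).2) ans := by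
  intro l
  induction l with
  | nil => intro _ ans hans; exact ⟨rfl, le_refl _⟩
  | cons pos l ih =>
    intro hall ans hans
    obtain ⟨g1, g2, _, _⟩ := group_prefix pos k (hall pos (by simp)) pos.length (le_refl _) ans hans
    simp only [List.foldl_cons]
    have hlb : (List.range (bKeys pos).length) = List.range pos.length := by rw [bKeys_length]
    obtain ⟨i1, i2⟩ := ih (fun p hp => hall p (by simp [hp])) _ (le_trans hans g2)
    refine ⟨?_, ?_⟩
    · rw [i1]; simp only [hlb]; rw [g1]
    · exact le_trans g2 i2

-- ===== VERDICT (by name: the statement is the Claim_ definition above) =====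
theorem max_run_after_deletions_spec : Claim_equal_max_run_after_deletions := by
  intro a k _
  unfold Spec_max_run_after_deletions
  simp only [max_run_after_deletions, max_run_after_deletions_alt]
  exact (fold_groups k _ (values_pairwise a) 1 (le_refl 1)).1
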